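-- pv_equiv track=rewrite | github.com/Jabs007/AI-Career-Roadmap-Recommender | etl/map_programmes.py | extract_department
-- ===== SOURCE A (Python) =====
-- def extract_department(programme_name: str) -> str:
--     programme = programme_name.lower()
--
--     if any(keyword in programme for keyword in ["engineering", "technology"]):
--         return "Engineering"
--     elif "education" in programme:
--         return "Education"
--     elif any(keyword in programme for keyword in ["medicine", "nursing", "pharmacy", "surgery", "clinical"]):
--         return "Health Sciences"
--     elif any(keyword in programme for keyword in ["business", "commerce", "accounting", "finance", "procurement", "economics"]):
--         return "Business"
--     elif any(keyword in programme for keyword in ["computer", "ict", "information technology", "software", "data", "ai", "cyber", "informatics"]):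
--         return "Computing"
--     elif any(keyword in programme for keyword in ["agriculture", "agribusiness", "animal", "crop", "food", "horticulture"]):
--         return "Agriculture"
--     elif any(keyword in programme for keyword in ["law", "criminology", "governance", "security", "international relations", "public policy"]):
--         return "Law / Social Sciences"
--     elif any(keyword in programme for keyword in ["environment", "forestry", "natural resources", "conservation"]):
--         return "Environmental Sciences"
--     elif any(keyword in programme for keyword in ["arts", "music", "literature", "theatre", "fine art", "design", "linguistics"]):
--         return "Arts & Humanities"
--     else:
--         return programme_name.strip()  # fallback to full name if no match
-- ===== SOURCE B (Python) =====
-- # Substring-indexing rewrite: instead of scanning every keyword against the name,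
-- # scan the name's substrings against a keyword->priority hash index and take the
-- # best (lowest-numbered) department found.
--
-- DEPARTMENTS = [
--     "Engineering", "Education", "Health Sciences", "Business", "Computing",
--     "Agriculture", "Law / Social Sciences", "Environmental Sciences",
--     "Arts & Humanities",
-- ]
--
-- KEYWORD_LISTS = [
--     ["engineering", "technology"],
--     ["education"],
--     ["medicine", "nursing", "pharmacy", "surgery", "clinical"],
--     ["business", "commerce", "accounting", "finance", "procurement", "economics"],
--     ["computer", "ict", "information technology", "software", "data", "ai", "cyber", "informatics"],
--     ["agriculture", "agribusiness", "animal", "crop", "food", "horticulture"],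
--     ["law", "criminology", "governance", "security", "international relations", "public policy"],
--     ["environment", "forestry", "natural resources", "conservation"],
--     ["arts", "music", "literature", "theatre", "fine art", "design", "linguistics"],
-- ]
--
-- KEYWORD_PRIO = {kw: prio for prio, kws in enumerate(KEYWORD_LISTS) for kw in kws}
-- LENGTHS = sorted({len(kw) for kw in KEYWORD_PRIO})
--
--
-- def extract_department(programme_name: str) -> str:
--     programme = programme_name.lower()
--     hits = [KEYWORD_PRIO[programme[i:i + L]]
--             for i in range(len(programme))
--             for L in LENGTHS
--             if programme[i:i + L] in KEYWORD_PRIO]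
--     if hits:
--         return DEPARTMENTS[min(hits)]
--     return programme_name.strip()
-- ===== Notes on version B (the rewrite author's own statement) =====
-- stated objective: alternative
-- what changed: Instead of testing each keyword for membership in the name per rule, B builds a keyword-to-priority hash index once and scans the lowered name's substrings (every start position, keyword lengths only) against it, returning the department of the minimum matched priority.
import Mathlib
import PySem

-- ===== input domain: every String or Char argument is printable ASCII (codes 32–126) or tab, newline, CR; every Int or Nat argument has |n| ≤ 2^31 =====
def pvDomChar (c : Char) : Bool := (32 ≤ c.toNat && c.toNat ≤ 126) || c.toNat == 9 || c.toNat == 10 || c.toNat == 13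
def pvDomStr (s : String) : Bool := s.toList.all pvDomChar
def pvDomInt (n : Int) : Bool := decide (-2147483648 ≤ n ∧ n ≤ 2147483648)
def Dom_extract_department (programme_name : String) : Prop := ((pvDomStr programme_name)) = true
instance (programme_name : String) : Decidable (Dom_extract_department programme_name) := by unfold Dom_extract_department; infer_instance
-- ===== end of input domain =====

-- B replaces A's per-keyword membership cascade by a keyword→priority hash index looked up
-- on the lowered name's substrings, returning the minimum matched priority's department (alternative algorithm).

-- ===== PORT A =====
def extract_department (programme_name : String) : String :=
  let programme := PySem.Str.lower programme_name
  if ["engineering", "technology"].any (fun keyword => PySem.Str.isIn keyword programme) then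
    "Engineering"
  else if PySem.Str.isIn "education" programme then
    "Education"
  else if ["medicine", "nursing", "pharmacy", "surgery", "clinical"].any (fun keyword => PySem.Str.isIn keyword programme) then
    "Health Sciences"
  else if ["business", "commerce", "accounting", "finance", "procurement", "economics"].any (fun keyword => PySem.Str.isIn keyword programme) then
    "Business"
  else if ["computer", "ict", "information technology", "software", "data", "ai", "cyber", "informatics"].any (fun keyword => PySem.Str.isIn keyword programme) then
    "Computing"
  else if ["agriculture", "agribusiness", "animal", "crop", "food", "horticulture"].any (fun keyword => PySem.Str.isIn keyword programme) then
    "Agriculture"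
  else if ["law", "criminology", "governance", "security", "international relations", "public policy"].any (fun keyword => PySem.Str.isIn keyword programme) then
    "Law / Social Sciences"
  else if ["environment", "forestry", "natural resources", "conservation"].any (fun keyword => PySem.Str.isIn keyword programme) then
    "Environmental Sciences"
  else if ["arts", "music", "literature", "theatre", "fine art", "design", "linguistics"].any (fun keyword => PySem.Str.isIn keyword programme) then
    "Arts & Humanities"
  else
    PySem.Str.strip programme_name

-- ===== PORT B =====
def pvDepartments : List String :=
  ["Engineering", "Education", "Health Sciences", "Business", "Computing",
   "Agriculture", "Law / Social Sciences", "Environmental Sciences", "Arts & Humanities"]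

def pvKeywordLists : List (List String) :=
  [["engineering", "technology"],
   ["education"],
   ["medicine", "nursing", "pharmacy", "surgery", "clinical"],
   ["business", "commerce", "accounting", "finance", "procurement", "economics"],
   ["computer", "ict", "information technology", "software", "data", "ai", "cyber", "informatics"],
   ["agriculture", "agribusiness", "animal", "crop", "food", "horticulture"],
   ["law", "criminology", "governance", "security", "international relations", "public policy"],
   ["environment", "forestry", "natural resources", "conservation"],
   ["arts", "music", "literature", "theatre", "fine art", "design", "linguistics"]]

-- dict comprehension over pairwise-distinct keys = its association list in insertion order
def pvKeywordPrio : PySem.Dict String Int :=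
  PySem.Dict.mk ((PySem.List.enumerate pvKeywordLists).flatMap (fun pr => pr.2.map (fun kw => (kw, pr.1))))

-- LENGTHS = sorted({len(kw) for kw in KEYWORD_PRIO}) (set consumed by key-less sorted: order-independent)
def pvLengths : List Int :=
  PySem.List.sorted (PySem.Set.ofList (pvKeywordPrio.keys.map PySem.Str.len)) (fun x => x) false

-- the 'hits' list comprehension ('if programme[i:i+L] in KEYWORD_PRIO' then 'KEYWORD_PRIO[programme[i:i+L]]' = filterMap get?)
def pvHits (programme : String) : List Int :=
  (PySem.List.pyRange 0 (PySem.Str.len programme) 1).flatMap (fun i =>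
    pvLengths.filterMap (fun L =>
      PySem.Dict.get? pvKeywordPrio (PySem.Str.slice programme (some i) (some (i + L)))))

def extract_department_alt (programme_name : String) : String :=
  let programme := PySem.Str.lower programme_name
  match PySem.List.min? (pvHits programme) (fun x => x) with
  | some m => PySem.List.pyGetD pvDepartments m ""  -- DEPARTMENTS[min(hits)]; the min is always an in-range index 0..8
  | none => PySem.Str.strip programme_name          -- hits empty

-- ===== PRECONDITION & SPEC =====
def Spec_extract_department (programme_name : String) (out : String) : Prop := out = extract_department_alt programme_name
instance (programme_name : String) (out : String) : Decidable (Spec_extract_department programme_name out) := by unfold Spec_extract_department; infer_instance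

-- ===== CLAIM (what is proved, stated in full; the proofs are below) =====
def Claim_equal_extract_department : Prop := ∀ (programme_name : String), Dom_extract_department programme_name → Spec_extract_department programme_name (extract_department programme_name)

-- ===== LEMMAS AND PROOFS =====

-- rule r matches the lowered programme (r = 0..8); getD on the literal table reduces to A's literal keyword lists
def pvK (r : Nat) (p : String) : Bool :=
  (pvKeywordLists.getD r []).any (fun kw => PySem.Str.isIn kw p)

theorem pvK1_eq (p : String) : pvK 1 p = PySem.Str.isIn "education" p := by
  unfold pvK pvKeywordLists; simp

set_option maxRecDepth 40000 in
theorem pvLengths_nonneg : ∀ L ∈ pvLengths, 0 ≤ L := by decide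

-- every table entry belongs to its rule's keyword list, with priority in [0,9)
set_option maxRecDepth 10000 in
theorem pvTable_sound : ∀ pr ∈ pvKeywordPrio.items,
    0 ≤ pr.2 ∧ pr.2 < 9 ∧ pr.1 ∈ pvKeywordLists.getD pr.2.toNat [] := by decide

-- every rule keyword is a nonempty key of the index with its rule's priority, and its length is scanned
set_option maxRecDepth 10000 in
theorem pvKeys_sound : ∀ r ∈ List.range 9, ∀ kw ∈ pvKeywordLists.getD r [],
    PySem.Dict.get? pvKeywordPrio kw = some (r : Int) ∧ kw.toList ≠ [] ∧
      ((kw.toList.length : Int) ∈ pvLengths) := by decide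

theorem pvGet?_mem {m : Int} {k : String} (h : PySem.Dict.get? pvKeywordPrio k = some m) :
    (k, m) ∈ pvKeywordPrio.items := by
  unfold PySem.Dict.get? at h
  obtain ⟨pr, hfind, hsnd⟩ := Option.map_eq_some_iff.mp h
  have hmem := List.mem_of_find?_eq_some hfind
  have hk := List.find?_some hfind
  simp only [beq_iff_eq] at hk
  have hpr : pr = (k, m) := by cases pr; simp_all
  exact hpr ▸ hmem

theorem mem_pvHits (p : String) (m : Int) :
    m ∈ pvHits p ↔ ∃ r : Nat, r < 9 ∧ m = (r : Int) ∧ pvK r p = true := by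
  constructor
  · intro hm
    unfold pvHits at hm
    simp only [List.mem_flatMap, List.mem_filterMap] at hm
    obtain ⟨i, hi, L, hL, hget⟩ := hm
    rw [PySem.List.mem_pyRange_one] at hi
    obtain ⟨n, rfl⟩ : ∃ n : Nat, i = (n : Int) := ⟨i.toNat, by omega⟩
    have hL0 : 0 ≤ L := pvLengths_nonneg L hL
    obtain ⟨l, rfl⟩ : ∃ l : Nat, L = (l : Int) := ⟨L.toNat, by omega⟩
    obtain ⟨ht1, ht2, ht3⟩ := pvTable_sound _ (pvGet?_mem hget)
    have ht1' : 0 ≤ m := ht1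
    have ht2' : m < 9 := ht2
    have ht3' : PySem.Str.slice p (some (n : Int)) (some ((n : Int) + (l : Int)))
        ∈ pvKeywordLists.getD m.toNat [] := ht3
    refine ⟨m.toNat, by omega, by omega, ?_⟩
    unfold pvK
    rw [List.any_eq_true]
    refine ⟨_, ht3', ?_⟩
    rw [PySem.Str.isIn_iff_infix]
    have h2 : (n : Int) + (l : Int) = ((n + l : Nat) : Int) := by push_cast; ring
    have hsl : (PySem.Str.slice p (some (n : Int)) (some ((n : Int) + (l : Int)))).toList
        = (p.toList.drop n).take l := by
      rw [PySem.Str.toList_slice, PySem.Chars.slice_eq_listSlice, h2,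
        PySem.List.slice_natCast, Nat.add_sub_cancel_left]
    rw [hsl]
    exact ((List.take_prefix _ _).isInfix).trans ((List.drop_suffix _ _).isInfix)
  · rintro ⟨r, hr9, rfl, hK⟩
    unfold pvK at hK
    rw [List.any_eq_true] at hK
    obtain ⟨kw, hkw, hin⟩ := hK
    obtain ⟨hget, hne, hLmem⟩ := pvKeys_sound r (List.mem_range.mpr hr9) kw hkw
    rw [PySem.Str.isIn_iff_infix] at hin
    obtain ⟨s, t, hst⟩ := hin
    have hk0 : 0 < kw.toList.length := List.length_pos_of_ne_nil hne
    have hlen : p.toList.length = s.length + kw.toList.length + t.length := by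
      rw [← hst]; simp only [List.length_append]
    unfold pvHits
    simp only [List.mem_flatMap, List.mem_filterMap]
    refine ⟨(s.length : Int), ?_, (kw.toList.length : Int), hLmem, ?_⟩
    · rw [PySem.List.mem_pyRange_one, PySem.Str.len_eq]
      constructor
      · exact Int.natCast_nonneg _
      · exact_mod_cast (by omega : s.length < p.toList.length)
    · have hslice : PySem.Str.slice p (some (s.length : Int))
          (some ((s.length : Int) + (kw.toList.length : Int))) = kw := by
        apply String.toList_injective
        have hb : (s.length : Int) + (kw.toList.length : Int)
            = ((s.length + kw.toList.length : Nat) : Int) := by push_cast; ring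
        rw [PySem.Str.toList_slice, PySem.Chars.slice_eq_listSlice, hb,
          PySem.List.slice_natCast, Nat.add_sub_cancel_left, ← hst,
          List.append_assoc, List.drop_left, List.take_left]
      rw [hslice]
      exact hget

theorem min_pvHits (p : String) (r : Nat) (hr : r < 9) (hK : pvK r p = true)
    (hlow : ∀ r' : Nat, r' < r → pvK r' p = false) :
    PySem.List.min? (pvHits p) (fun x => x) = some (r : Int) := by
  have hrmem : (r : Int) ∈ pvHits p := (mem_pvHits p r).mpr ⟨r, hr, rfl, hK⟩
  cases h : PySem.List.min? (pvHits p) (fun x => x) with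
  | none =>
    rw [PySem.List.min?_eq_none_iff] at h
    rw [h] at hrmem; simp at hrmem
  | some m =>
    have hm := PySem.List.min?_mem h
    have hle := PySem.List.min?_isMin h
    obtain ⟨r', hr', hmr, hK'⟩ := (mem_pvHits p m).mp hm
    have h1 : m ≤ (r : Int) := hle _ hrmem
    have h2 : r ≤ r' := by
      by_contra hc
      push Not at hc
      rw [hlow r' hc] at hK'
      exact Bool.false_ne_true hK'
    have hmr' : m = (r : Int) := by omega
    rw [hmr']

theorem pvHits_nil (p : String) (hall : ∀ r : Nat, r < 9 → pvK r p = false) :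
    pvHits p = [] := by
  rw [List.eq_nil_iff_forall_not_mem]
  intro m hm
  obtain ⟨r, hr, _, hK⟩ := (mem_pvHits p m).mp hm
  rw [hall r hr] at hK
  exact Bool.false_ne_true hK

theorem pvC0_eq (p : String) : (["engineering", "technology"].any (fun keyword => PySem.Str.isIn keyword p)) = pvK 0 p := rfl
theorem pvC2_eq (p : String) : (["medicine", "nursing", "pharmacy", "surgery", "clinical"].any (fun keyword => PySem.Str.isIn keyword p)) = pvK 2 p := rfl
theorem pvC3_eq (p : String) : (["business", "commerce", "accounting", "finance", "procurement", "economics"].any (fun keyword => PySem.Str.isIn keyword p)) = pvK 3 p := rfl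
theorem pvC4_eq (p : String) : (["computer", "ict", "information technology", "software", "data", "ai", "cyber", "informatics"].any (fun keyword => PySem.Str.isIn keyword p)) = pvK 4 p := rfl
theorem pvC5_eq (p : String) : (["agriculture", "agribusiness", "animal", "crop", "food", "horticulture"].any (fun keyword => PySem.Str.isIn keyword p)) = pvK 5 p := rfl
theorem pvC6_eq (p : String) : (["law", "criminology", "governance", "security", "international relations", "public policy"].any (fun keyword => PySem.Str.isIn keyword p)) = pvK 6 p := rfl
theorem pvC7_eq (p : String) : (["environment", "forestry", "natural resources", "conservation"].any (fun keyword => PySem.Str.isIn keyword p)) = pvK 7 p := rfl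
theorem pvC8_eq (p : String) : (["arts", "music", "literature", "theatre", "fine art", "design", "linguistics"].any (fun keyword => PySem.Str.isIn keyword p)) = pvK 8 p := rfl
theorem pvC1_eq (p : String) : PySem.Str.isIn "education" p = pvK 1 p := (pvK1_eq p).symm

-- ===== VERDICT (by name: the statement is the Claim_ definition above) =====
set_option maxHeartbeats 1600000 in
set_option maxRecDepth 10000 in
theorem extract_department_spec : Claim_equal_extract_department := by
  intro pn _
  simp only [Spec_extract_department, extract_department, extract_department_alt]
  set p := PySem.Str.lower pn with hp
  rw [pvC0_eq, pvC1_eq, pvC2_eq, pvC3_eq, pvC4_eq, pvC5_eq, pvC6_eq, pvC7_eq, pvC8_eq]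
  split_ifs with g0 g1 g2 g3 g4 g5 g6 g7 g8
  · rw [min_pvHits p 0 (by norm_num) g0 (fun r' h => absurd h (by omega))]
    rfl
  · have hf0 : pvK 0 p = false := by simpa using g0
    rw [min_pvHits p 1 (by norm_num) g1 (fun r' h => by
      have h' : r' = 0 := by omega
      rcases h' with rfl
      exacts [hf0])]
    rfl
  · have hf0 : pvK 0 p = false := by simpa using g0
    have hf1 : pvK 1 p = false := by simpa using g1
    rw [min_pvHits p 2 (by norm_num) g2 (fun r' h => by
      have h' : r' = 0 ∨ r' = 1 := by omega
      rcases h' with rfl|rfl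
      exacts [hf0, hf1])]
    rfl
  · have hf0 : pvK 0 p = false := by simpa using g0
    have hf1 : pvK 1 p = false := by simpa using g1
    have hf2 : pvK 2 p = false := by simpa using g2
    rw [min_pvHits p 3 (by norm_num) g3 (fun r' h => by
      have h' : r' = 0 ∨ r' = 1 ∨ r' = 2 := by omega
      rcases h' with rfl|rfl|rfl
      exacts [hf0, hf1, hf2])]
    rfl
  · have hf0 : pvK 0 p = false := by simpa using g0
    have hf1 : pvK 1 p = false := by simpa using g1
    have hf2 : pvK 2 p = false := by simpa using g2
    have hf3 : pvK 3 p = false := by simpa using g3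
    rw [min_pvHits p 4 (by norm_num) g4 (fun r' h => by
      have h' : r' = 0 ∨ r' = 1 ∨ r' = 2 ∨ r' = 3 := by omega
      rcases h' with rfl|rfl|rfl|rfl
      exacts [hf0, hf1, hf2, hf3])]
    rfl
  · have hf0 : pvK 0 p = false := by simpa using g0
    have hf1 : pvK 1 p = false := by simpa using g1
    have hf2 : pvK 2 p = false := by simpa using g2
    have hf3 : pvK 3 p = false := by simpa using g3
    have hf4 : pvK 4 p = false := by simpa using g4
    rw [min_pvHits p 5 (by norm_num) g5 (fun r' h => by
      have h' : r' = 0 ∨ r' = 1 ∨ r' = 2 ∨ r' = 3 ∨ r' = 4 := by omega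
      rcases h' with rfl|rfl|rfl|rfl|rfl
      exacts [hf0, hf1, hf2, hf3, hf4])]
    rfl
  · have hf0 : pvK 0 p = false := by simpa using g0
    have hf1 : pvK 1 p = false := by simpa using g1
    have hf2 : pvK 2 p = false := by simpa using g2
    have hf3 : pvK 3 p = false := by simpa using g3
    have hf4 : pvK 4 p = false := by simpa using g4
    have hf5 : pvK 5 p = false := by simpa using g5
    rw [min_pvHits p 6 (by norm_num) g6 (fun r' h => by
      have h' : r' = 0 ∨ r' = 1 ∨ r' = 2 ∨ r' = 3 ∨ r' = 4 ∨ r' = 5 := by omega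
      rcases h' with rfl|rfl|rfl|rfl|rfl|rfl
      exacts [hf0, hf1, hf2, hf3, hf4, hf5])]
    rfl
  · have hf0 : pvK 0 p = false := by simpa using g0
    have hf1 : pvK 1 p = false := by simpa using g1
    have hf2 : pvK 2 p = false := by simpa using g2
    have hf3 : pvK 3 p = false := by simpa using g3
    have hf4 : pvK 4 p = false := by simpa using g4
    have hf5 : pvK 5 p = false := by simpa using g5
    have hf6 : pvK 6 p = false := by simpa using g6
    rw [min_pvHits p 7 (by norm_num) g7 (fun r' h => by
      have h' : r' = 0 ∨ r' = 1 ∨ r' = 2 ∨ r' = 3 ∨ r' = 4 ∨ r' = 5 ∨ r' = 6 := by omega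
      rcases h' with rfl|rfl|rfl|rfl|rfl|rfl|rfl
      exacts [hf0, hf1, hf2, hf3, hf4, hf5, hf6])]
    rfl
  · have hf0 : pvK 0 p = false := by simpa using g0
    have hf1 : pvK 1 p = false := by simpa using g1
    have hf2 : pvK 2 p = false := by simpa using g2
    have hf3 : pvK 3 p = false := by simpa using g3
    have hf4 : pvK 4 p = false := by simpa using g4
    have hf5 : pvK 5 p = false := by simpa using g5
    have hf6 : pvK 6 p = false := by simpa using g6
    have hf7 : pvK 7 p = false := by simpa using g7
    rw [min_pvHits p 8 (by norm_num) g8 (fun r' h => by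
      have h' : r' = 0 ∨ r' = 1 ∨ r' = 2 ∨ r' = 3 ∨ r' = 4 ∨ r' = 5 ∨ r' = 6 ∨ r' = 7 := by omega
      rcases h' with rfl|rfl|rfl|rfl|rfl|rfl|rfl|rfl
      exacts [hf0, hf1, hf2, hf3, hf4, hf5, hf6, hf7])]
    rfl
  · have hf0 : pvK 0 p = false := by simpa using g0
    have hf1 : pvK 1 p = false := by simpa using g1
    have hf2 : pvK 2 p = false := by simpa using g2
    have hf3 : pvK 3 p = false := by simpa using g3
    have hf4 : pvK 4 p = false := by simpa using g4
    have hf5 : pvK 5 p = false := by simpa using g5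
    have hf6 : pvK 6 p = false := by simpa using g6
    have hf7 : pvK 7 p = false := by simpa using g7
    have hf8 : pvK 8 p = false := by simpa using g8
    rw [pvHits_nil p (fun r hr => by
      have h' : r = 0 ∨ r = 1 ∨ r = 2 ∨ r = 3 ∨ r = 4 ∨ r = 5 ∨ r = 6 ∨ r = 7 ∨ r = 8 := by omega
      rcases h' with rfl|rfl|rfl|rfl|rfl|rfl|rfl|rfl|rfl
      exacts [hf0, hf1, hf2, hf3, hf4, hf5, hf6, hf7, hf8])]
    rfl
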